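-- pv_equiv track=rewrite | github.com/Wangguichao21221/CS190C-A3 | src/eval.py | _first_answer_span
-- ===== SOURCE A (Python) =====
-- def _first_answer_span(text: str) -> str:
--   """Keep only the first answer block and drop any continuation into the next problem."""
--   if "####" not in text:
--     return ""
--
--   answer_text = text.split("####", 1)[1]
--
--   cut_positions = [len(answer_text)]
--   for marker in ("\nQuestion:", "\n\nQuestion:", "\nAnswer:", "\n\nAnswer:"):
--     marker_pos = answer_text.find(marker)
--     if marker_pos != -1:
--       cut_positions.append(marker_pos)
--
--   return answer_text[: min(cut_positions)].strip()
-- ===== SOURCE B (Python) =====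
-- def _first_answer_span(text: str) -> str:
--   """Keep only the first answer block and drop any continuation into the next problem."""
--   if "####" not in text:
--     return ""
--
--   answer_text = text.split("####", 1)[1]
--
--   # single left-to-right scan: cut at the first newline that starts any of the
--   # four continuation markers, instead of four separate find passes plus min()
--   n = len(answer_text)
--   for i in range(n):
--     if answer_text[i] == "\n":
--       j = i + 1
--       if j < n and answer_text[j] == "\n":
--         j += 1
--       if answer_text.startswith("Question:", j) or answer_text.startswith("Answer:", j):
--         return answer_text[:i].strip()
--   return answer_text.strip()
-- ===== Notes on version B (the rewrite author's own statement) =====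
-- stated objective: alternative
-- what changed: After splitting off the text that follows the first four-hash delimiter, B finds the cut point with one left-to-right scan that tests at each newline whether a continuation marker (Question/Answer label after one or two newlines) starts there, instead of A's four separate substring find passes followed by min().
import Mathlib
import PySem

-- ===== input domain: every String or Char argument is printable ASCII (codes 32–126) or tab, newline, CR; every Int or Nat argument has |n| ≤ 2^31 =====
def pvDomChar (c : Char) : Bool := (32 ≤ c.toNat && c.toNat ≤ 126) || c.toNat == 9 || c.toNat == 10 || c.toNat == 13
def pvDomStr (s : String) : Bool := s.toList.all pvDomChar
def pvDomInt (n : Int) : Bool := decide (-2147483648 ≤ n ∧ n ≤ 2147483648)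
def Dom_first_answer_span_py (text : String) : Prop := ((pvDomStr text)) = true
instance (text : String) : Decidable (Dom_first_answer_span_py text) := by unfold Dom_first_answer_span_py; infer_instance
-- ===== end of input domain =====

-- B replaces A's four-marker find loop plus min() with a single left-to-right scan for
-- the first newline that starts a continuation marker (objective: alternative, same result).

-- ===== PORT A =====
-- text.split("####", 1)[1]: both Pythons contain this identical line, so the helper is
-- shared by both ports.  Under the '"####" in text' guard part 1 always exists, so the
-- .getD [] default and the none branch are unreachable there.
def pvAfterHashes (s : List Char) : List Char :=
  match PySem.Chars.splitMax? s "####".toList 1 with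
  | some parts => (PySem.List.pyGet? parts 1).getD []
  | none => []

-- the tuple ("\nQuestion:", "\n\nQuestion:", "\nAnswer:", "\n\nAnswer:") A loops over
def pvMarkers : List (List Char) :=
  ["\nQuestion:".toList, "\n\nQuestion:".toList, "\nAnswer:".toList, "\n\nAnswer:".toList]

def first_answer_span_py (text : String) : String :=
  if PySem.Chars.isIn "####".toList text.toList = false then "" else
  let answer := pvAfterHashes text.toList
  let cuts : List Int :=
    pvMarkers.foldl (fun acc m =>
      let p := PySem.Chars.find answer m
      if p ≠ -1 then acc ++ [p] else acc) [(answer.length : Int)]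
  -- min(cut_positions); cuts starts with len(answer_text), so the none branch is unreachable
  match PySem.List.min? cuts (fun x => x) with
  | some m => String.ofList (PySem.Chars.strip (PySem.Chars.slice answer none (some m)))
  | none => ""

-- ===== PORT B =====
-- the body of B's loop at position i, reading the suffix answer_text[i:]:
-- answer_text[i] == "\n", the optional second "\n" (the j skip), then startswith at j
def pvAltMatch (t : List Char) : Bool :=
  match t with
  | [] => false
  | c :: rest =>
    if c = '\n' then
      match rest with
      | d :: rest2 =>
        if d = '\n' then
          PySem.Chars.startswith rest2 "Question:".toList
            || PySem.Chars.startswith rest2 "Answer:".toList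
        else
          PySem.Chars.startswith rest "Question:".toList
            || PySem.Chars.startswith rest "Answer:".toList
      | [] =>
          PySem.Chars.startswith rest "Question:".toList
            || PySem.Chars.startswith rest "Answer:".toList
    else false

-- B's 'for i in range(n)' scan: some i = first match (the early return), none = fell through
def pvAltScan : List Char → Option Nat
  | [] => none
  | c :: rest =>
      if pvAltMatch (c :: rest) then some 0
      else (pvAltScan rest).map (· + 1)

def first_answer_span_py_alt (text : String) : String :=
  if PySem.Chars.isIn "####".toList text.toList = false then "" else
  let answer := pvAfterHashes text.toList
  match pvAltScan answer with
  | some i => String.ofList (PySem.Chars.strip (answer.take i))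
  | none => String.ofList (PySem.Chars.strip answer)

-- ===== PRECONDITION & SPEC =====
def Spec_first_answer_span_py (text : String) (out : String) : Prop := out = first_answer_span_py_alt text
instance (text : String) (out : String) : Decidable (Spec_first_answer_span_py text out) := by unfold Spec_first_answer_span_py; infer_instance

-- ===== CLAIM (what is proved, stated in full; the proofs are below) =====
def Claim_equal_first_answer_span_py : Prop := ∀ (text : String), Dom_first_answer_span_py text → Spec_first_answer_span_py text (first_answer_span_py text)

-- ===== LEMMAS AND PROOFS =====

lemma pvM1 : "\nQuestion:".toList = '\n' :: "Question:".toList := rfl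
lemma pvM2 : "\n\nQuestion:".toList = '\n' :: '\n' :: "Question:".toList := rfl
lemma pvM3 : "\nAnswer:".toList = '\n' :: "Answer:".toList := rfl
lemma pvM4 : "\n\nAnswer:".toList = '\n' :: '\n' :: "Answer:".toList := rfl
lemma pvQ : "Question:".toList = 'Q' :: "uestion:".toList := rfl
lemma pvA : "Answer:".toList = 'A' :: "nswer:".toList := rfl

-- B's per-position test holds exactly when one of A's four markers starts here
lemma pvAltMatch_iff (t : List Char) :
    pvAltMatch t = true ↔ ∃ m ∈ pvMarkers, m <+: t := by
  match t with
  | [] => simp [pvAltMatch, pvMarkers, pvM1, pvM2, pvM3, pvM4]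
  | c :: rest =>
    by_cases hc : c = '\n'
    · subst hc
      match rest with
      | [] =>
        simp [pvAltMatch, pvMarkers, pvM1, pvM2, pvM3, pvM4, pvQ, pvA,
          PySem.Chars.startswith_iff, List.cons_prefix_cons]
      | d :: rest2 =>
        by_cases hd : d = '\n'
        · subst hd
          simp [pvAltMatch, pvMarkers, pvM1, pvM2, pvM3, pvM4, pvQ, pvA,
            PySem.Chars.startswith_iff, List.cons_prefix_cons]
        · simp [pvAltMatch, pvMarkers, pvM1, pvM2, pvM3, pvM4, pvQ, pvA, hd,
            PySem.Chars.startswith_iff, List.cons_prefix_cons, Ne.symm hd]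
    · simp [pvAltMatch, pvMarkers, pvM1, pvM2, pvM3, pvM4, hc,
        List.cons_prefix_cons, Ne.symm hc]

-- scan found nothing: no position matches
lemma pvAltScan_none {s : List Char} (h : pvAltScan s = none) :
    ∀ i, pvAltMatch (s.drop i) = false := by
  induction s with
  | nil => intro i; simp [pvAltMatch]
  | cons c rest ih =>
    rw [pvAltScan] at h
    split at h
    · exact absurd h (by simp)
    · intro i
      match i with
      | 0 => simpa using Bool.not_eq_true _ |>.mp (by assumption)
      | i + 1 => exact ih (by simpa using h) i

-- scan found k: k is in range, matches, and is the first match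
lemma pvAltScan_some {s : List Char} {k : Nat} (h : pvAltScan s = some k) :
    k ≤ s.length ∧ pvAltMatch (s.drop k) = true ∧ ∀ i < k, pvAltMatch (s.drop i) = false := by
  induction s generalizing k with
  | nil => simp [pvAltScan] at h
  | cons c rest ih =>
    rw [pvAltScan] at h
    split at h
    · obtain rfl : k = 0 := by simpa using h.symm
      refine ⟨by simp, by simpa using (by assumption), by omega⟩
    · rw [Option.map_eq_some_iff] at h
      obtain ⟨k', hk', rfl⟩ := h
      obtain ⟨h1, h2, h3⟩ := ih hk'
      refine ⟨by simpa using h1, by simpa using h2, ?_⟩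
      intro i hi
      match i with
      | 0 => simpa using Bool.not_eq_true _ |>.mp (by assumption)
      | i + 1 => exact h3 i (by omega)

-- the cut index B computes, as a Nat
def pvCut (s : List Char) : Nat :=
  match pvAltScan s with
  | some k => k
  | none => s.length

-- A's min over cut_positions equals B's scan result
lemma pvMin_eq_cut (s : List Char) :
    List.foldl min (s.length : Int)
      ((pvMarkers.filter (fun m => PySem.Chars.find s m ≠ -1)).map (PySem.Chars.find s))
      = (pvCut s : Int) := by
  set extras := (pvMarkers.filter (fun m => PySem.Chars.find s m ≠ -1)).map (PySem.Chars.find s) with hex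
  have hcut_le_len : pvCut s ≤ s.length := by
    unfold pvCut
    rcases hscan : pvAltScan s with _ | k
    · simp
    · exact (pvAltScan_some hscan).1
  have hub : ∀ e ∈ extras, (pvCut s : Int) ≤ e := by
    intro e he
    rw [hex] at he
    simp only [List.mem_map, List.mem_filter, decide_eq_true_eq] at he
    obtain ⟨m, ⟨hmem, hne⟩, rfl⟩ := he
    have h0 : 0 ≤ PySem.Chars.find s m := by
      have := PySem.Chars.neg_one_le_find s m; omega
    obtain ⟨hpre, _⟩ := PySem.Chars.find_spec h0
    have hmatch : pvAltMatch (s.drop (PySem.Chars.find s m).toNat) = true :=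
      (pvAltMatch_iff _).2 ⟨m, hmem, hpre⟩
    rcases hscan : pvAltScan s with _ | k
    · exact absurd hmatch (by simp [pvAltScan_none hscan])
    · obtain ⟨_, _, hfirst⟩ := pvAltScan_some hscan
      have hge : ¬ (PySem.Chars.find s m).toNat < k := fun hlt => by
        simp [hfirst _ hlt] at hmatch
      have hc : pvCut s = k := by simp [pvCut, hscan]
      rw [hc]; omega
  apply le_antisymm
  · -- exhibit an element of cut_positions that is ≤ pvCut
    rcases hscan : pvAltScan s with _ | k
    · have hc : pvCut s = s.length := by simp [pvCut, hscan]
      rw [hc]; exact (PySem.List.foldl_min_le extras (s.length : Int)).1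
    · obtain ⟨hk, hm, _⟩ := pvAltScan_some hscan
      obtain ⟨m, hmem, hpre⟩ := (pvAltMatch_iff _).1 hm
      have hinfix : m <:+: s := hpre.isInfix.trans (List.drop_suffix k s).isInfix
      have h0 : 0 ≤ PySem.Chars.find s m := (PySem.Chars.find_nonneg_iff s m).2 hinfix
      obtain ⟨_, hmin⟩ := PySem.Chars.find_spec h0
      have hle : (PySem.Chars.find s m).toNat ≤ k := by
        by_contra hcon
        exact (hmin k (by omega)) hpre
      have hmemex : PySem.Chars.find s m ∈ extras := by
        rw [hex]
        simp only [List.mem_map, List.mem_filter, decide_eq_true_eq]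
        exact ⟨m, ⟨hmem, by omega⟩, rfl⟩
      have hmle := (PySem.List.foldl_min_le extras (s.length : Int)).2 _ hmemex
      have hc : pvCut s = k := by simp [pvCut, hscan]
      rw [hc]; omega
  · rcases PySem.List.foldl_min_mem extras (s.length : Int) with h | h
    · rw [h]; exact_mod_cast hcut_le_len
    · exact hub _ h

theorem first_answer_span_py_spec_aux (text : String) :
    first_answer_span_py text = first_answer_span_py_alt text := by
  unfold first_answer_span_py first_answer_span_py_alt
  split
  · rfl
  · set answer := pvAfterHashes text.toList with ha
    have hfold := PySem.List.foldl_append_if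
      (fun m => decide (PySem.Chars.find answer m ≠ -1)) (PySem.Chars.find answer)
      pvMarkers [(answer.length : Int)]
    simp only [decide_eq_true_eq] at hfold
    dsimp only
    rw [hfold, List.singleton_append, PySem.List.min?_id_cons]
    have hmin := pvMin_eq_cut answer
    rw [hmin]
    dsimp only
    rw [PySem.Chars.slice_eq_listSlice, PySem.List.slice_to answer (Int.natCast_nonneg _),
      Int.toNat_natCast]
    rcases hscan : pvAltScan answer with _ | k
    · have hc : pvCut answer = answer.length := by simp [pvCut, hscan]
      rw [hc, List.take_length]
    · have hc : pvCut answer = k := by simp [pvCut, hscan]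
      rw [hc]

-- ===== VERDICT (by name: the statement is the Claim_ definition above) =====
theorem first_answer_span_py_spec : Claim_equal_first_answer_span_py := by
  intro text _
  unfold Spec_first_answer_span_py
  exact first_answer_span_py_spec_aux text
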